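-- pv_equiv track=rewrite | github.com/KingWitherBrine/py | other/python/milk_pail_II.py | solve
-- ===== SOURCE A (Python) =====
-- def solve(x, y, m):
--   max_num = 0
--   for i in range(m+1):
--     for j in range(m+1):
--       if (x * i + y * j) <= m:
--         if (x * i + y * j) > max_num:
--           max_num = (x * i + y * j)
--   return max_num
-- ===== SOURCE B (Python) =====
-- def solve(x, y, m):
--     # Single loop over i; for each i the best j in [0, m] is computed in O(1)
--     # from the sign of y, instead of scanning all j.
--     best = 0
--     for i in range(m + 1):
--         t = m - x * i          # slack available for y * j
--         if y > 0:
--             if t < 0: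
--                 continue       # every j only increases the value past m
--             j = min(t // y, m)
--         elif y == 0:
--             if t < 0:
--                 continue
--             j = 0
--         else:
--             j = max(0, -(t // -y))   # smallest j with y * j <= t
--             if j > m:
--                 continue
--         v = x * i + y * j
--         if v > best:
--             best = v
--     return best
-- ===== Notes on version B (the rewrite author's own statement) =====
-- stated objective: faster
-- what changed: Replaces the nested O(m^2) scan over all (i,j) pairs by a single loop over i that picks the optimal j in closed form (floor/ceil division depending on the sign of y).
import Mathlib
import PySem

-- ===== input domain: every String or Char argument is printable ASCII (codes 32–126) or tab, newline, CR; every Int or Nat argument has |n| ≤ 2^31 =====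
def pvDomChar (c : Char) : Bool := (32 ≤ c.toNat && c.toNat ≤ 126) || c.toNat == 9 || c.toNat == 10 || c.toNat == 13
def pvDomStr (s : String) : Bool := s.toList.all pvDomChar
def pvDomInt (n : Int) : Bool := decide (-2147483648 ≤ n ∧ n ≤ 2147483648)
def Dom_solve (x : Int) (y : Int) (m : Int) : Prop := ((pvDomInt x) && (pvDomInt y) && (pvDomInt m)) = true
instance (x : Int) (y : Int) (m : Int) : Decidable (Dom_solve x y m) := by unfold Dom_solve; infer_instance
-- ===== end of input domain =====

-- B replaces A's nested O(m^2) scan over all (i, j) by a single loop over i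
-- picking the optimal j in closed form; equivalence of return values is proved below.

-- ===== PORT A =====
def solve (x : Int) (y : Int) (m : Int) : Int :=
  (PySem.List.pyRange 0 (m + 1) 1).foldl (fun max_num i =>
    (PySem.List.pyRange 0 (m + 1) 1).foldl (fun a j =>
      if x * i + y * j ≤ m then
        (if x * i + y * j > a then x * i + y * j else a)
      else a) max_num) 0

-- ===== PORT B =====
-- best j in [0, m] for a given i (none = the loop's `continue`)
def solveAltCand (x : Int) (y : Int) (m : Int) (i : Int) : Option Int :=
  let t := m - x * i
  if y > 0 then
    if t < 0 then none
    else some (x * i + y * (min (PySem.Int.floordiv t y) m))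
  else if y = 0 then
    if t < 0 then none
    else some (x * i + y * 0)
  else
    let j := max 0 (-(PySem.Int.floordiv t (-y)))
    if j > m then none
    else some (x * i + y * j)

def solve_alt (x : Int) (y : Int) (m : Int) : Int :=
  (PySem.List.pyRange 0 (m + 1) 1).foldl (fun best i =>
    match solveAltCand x y m i with
    | none => best
    | some v => if v > best then v else best) 0

-- ===== PRECONDITION & SPEC =====
def Spec_solve (x : Int) (y : Int) (m : Int) (out : Int) : Prop := out = solve_alt x y m
instance (x : Int) (y : Int) (m : Int) (out : Int) : Decidable (Spec_solve x y m out) := by unfold Spec_solve; infer_instance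

-- ===== CLAIM (what is proved, stated in full; the proofs are below) =====
def Claim_equal_solve : Prop := ∀ (x : Int) (y : Int) (m : Int), Dom_solve x y m → Spec_solve x y m (solve x y m)

-- ===== LEMMAS AND PROOFS =====

-- Properties of A's inner fold over j, by induction on the list.
theorem innerA_le (c : Int → Int) (m : Int) (l : List Int) (acc : Int) :
    acc ≤ l.foldl (fun a j => if c j ≤ m then (if c j > a then c j else a) else a) acc := by
  induction l generalizing acc with
  | nil => simp
  | cons j l ih =>
    simp only [List.foldl_cons]
    refine le_trans ?_ (ih _)
    split_ifs <;> omega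

theorem innerA_ub (c : Int → Int) (m : Int) (l : List Int) (acc : Int) :
    ∀ j ∈ l, c j ≤ m → c j ≤ l.foldl (fun a j => if c j ≤ m then (if c j > a then c j else a) else a) acc := by
  induction l generalizing acc with
  | nil => simp
  | cons k l ih =>
    intro j hj hcj
    simp only [List.foldl_cons]
    rcases List.mem_cons.mp hj with h | h
    · subst h
      refine le_trans ?_ (innerA_le c m l _)
      split_ifs <;> omega
    · exact ih _ j h hcj

theorem innerA_shape (c : Int → Int) (m : Int) (l : List Int) (acc : Int) :
    (l.foldl (fun a j => if c j ≤ m then (if c j > a then c j else a) else a) acc = acc)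
    ∨ ∃ j ∈ l, c j ≤ m ∧
        l.foldl (fun a j => if c j ≤ m then (if c j > a then c j else a) else a) acc = c j := by
  induction l generalizing acc with
  | nil => left; simp
  | cons k l ih =>
    simp only [List.foldl_cons]
    by_cases hk : c k ≤ m
    · by_cases hk2 : c k > acc
      · simp only [if_pos hk, if_pos hk2]
        rcases ih (c k) with h | ⟨j, hj, hcj, hres⟩
        · right; exact ⟨k, List.mem_cons_self, hk, h⟩
        · right; exact ⟨j, List.mem_cons_of_mem _ hj, hcj, hres⟩
      · simp only [if_pos hk, if_neg hk2]
        rcases ih acc with h | ⟨j, hj, hcj, hres⟩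
        · left; exact h
        · right; exact ⟨j, List.mem_cons_of_mem _ hj, hcj, hres⟩
    · simp only [if_neg hk]
      rcases ih acc with h | ⟨j, hj, hcj, hres⟩
      · left; exact h
      · right; exact ⟨j, List.mem_cons_of_mem _ hj, hcj, hres⟩

-- If no j in the list is feasible, the inner fold returns acc unchanged.
theorem innerA_none (c : Int → Int) (m : Int) (l : List Int) (acc : Int)
    (h : ∀ j ∈ l, ¬ c j ≤ m) :
    l.foldl (fun a j => if c j ≤ m then (if c j > a then c j else a) else a) acc = acc := by
  rcases innerA_shape c m l acc with h0 | ⟨j, hj, hcj, _⟩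
  · exact h0
  · exact absurd hcj (h j hj)

-- If j* is feasible and dominates every feasible j in the list, the fold returns max acc (c j*).
theorem innerA_best (c : Int → Int) (m : Int) (l : List Int) (acc : Int)
    (j' : Int) (hj' : j' ∈ l) (hf : c j' ≤ m)
    (hmax : ∀ j ∈ l, c j ≤ m → c j ≤ c j') :
    l.foldl (fun a j => if c j ≤ m then (if c j > a then c j else a) else a) acc
      = if c j' > acc then c j' else acc := by
  have h1 := innerA_le c m l acc
  have h2 := innerA_ub c m l acc j' hj' hf
  rcases innerA_shape c m l acc with h0 | ⟨j, hj, hcj, hres⟩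
  · have := hmax j' hj' hf
    rw [h0]; rw [h0] at h2; omega
  · have := hmax j hj hcj
    rw [hres]; rw [hres] at h1; omega

-- Step equality: for 0 ≤ m, A's inner loop over j equals B's closed-form update.
theorem step_eq (x y m i acc : Int) (hm : 0 ≤ m) :
    (PySem.List.pyRange 0 (m + 1) 1).foldl (fun a j =>
      if x * i + y * j ≤ m then (if x * i + y * j > a then x * i + y * j else a) else a) acc
    = match solveAltCand x y m i with
      | none => acc
      | some v => if v > acc then v else acc := by
  set c : Int → Int := fun j => x * i + y * j with hc
  have hmem : ∀ j : Int, j ∈ PySem.List.pyRange 0 (m + 1) 1 ↔ 0 ≤ j ∧ j < m + 1 := by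
    intro j; exact PySem.List.mem_pyRange_one
  unfold solveAltCand
  rcases lt_trichotomy y 0 with hy | hy | hy
  · -- y < 0 : smallest feasible j wins
    have hd : (0:Int) < -y := by omega
    have hed : PySem.Int.floordiv (m - x * i) (-y) = (m - x * i) / (-y) :=
      PySem.Int.floordiv_eq_ediv_of_pos hd
    simp only [if_neg (by omega : ¬ y > 0), if_neg (by omega : ¬ y = 0), hed]
    set t := m - x * i with ht
    set j0 : Int := -(t / (-y)) with hj0
    -- key division facts for divisor -y > 0
    have hdivmod := Int.mul_ediv_add_emod t (-y)
    have hmod1 : 0 ≤ t % (-y) := Int.emod_nonneg t (by omega)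
    have hmod2 : t % (-y) < -y := Int.emod_lt_of_pos t hd
    -- y * j0 ≤ t  (ceiling property): y * j0 = (-y) * (t / -y) ≤ t
    have hj0feas : y * j0 ≤ t := by
      have : y * j0 = (-y) * (t / (-y)) := by rw [hj0]; ring
      rw [this]; omega
    -- any feasible j (y*j ≤ t) satisfies j0 ≤ j
    have hdom : ∀ j : Int, y * j ≤ t → j0 ≤ j := by
      intro j hfj
      have h1 : -j ≤ t / (-y) := by
        rw [Int.le_ediv_iff_mul_le hd]
        nlinarith
      omega
    by_cases hcase : max 0 j0 > m
    · simp only [if_pos hcase]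
      refine innerA_none c m _ acc ?_
      intro j hj
      have hjb := (hmem j).mp hj
      intro hfeas
      have : y * j ≤ t := by simp only [hc] at hfeas; omega
      have := hdom j this
      omega
    · simp only [if_neg hcase]
      refine innerA_best c m _ acc (max 0 j0) ((hmem _).mpr (by omega)) ?_ ?_
      · -- feasibility of j* = max 0 j0
        simp only [hc]
        rcases le_or_gt j0 0 with h0 | h0
        · have hjstar : max 0 j0 = 0 := by omega
          -- j0 ≤ 0 means t / (-y) ≥ 0, hence t ≥ 0
          have : 0 ≤ t / (-y) := by omega
          have ht0 : 0 ≤ t := by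
            by_contra hneg
            have : t / (-y) < 0 := Int.ediv_neg_of_neg_of_pos (by omega) hd
            omega
          rw [hjstar]; omega
        · have hjstar : max 0 j0 = j0 := by omega
          rw [hjstar]; omega
      · intro j hj hfeas
        have hjb := (hmem j).mp hj
        simp only [hc] at hfeas ⊢
        have hyj : y * j ≤ t := by omega
        have hge : max 0 j0 ≤ j := by
          have := hdom j hyj
          omega
        nlinarith
  · -- y = 0
    subst hy
    simp only [if_neg (by omega : ¬ (0:Int) > 0), if_true]
    by_cases ht : m - x * i < 0
    · simp only [if_pos ht]
      refine innerA_none c m _ acc ?_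
      intro j hj
      simp only [hc]; omega
    · simp only [if_neg ht]
      refine innerA_best c m _ acc 0 ((hmem _).mpr (by omega)) ?_ ?_
      · simp only [hc]; omega
      · intro j hj _; simp only [hc]; omega
  · -- y > 0 : largest feasible j wins
    have hed : PySem.Int.floordiv (m - x * i) y = (m - x * i) / y :=
      PySem.Int.floordiv_eq_ediv_of_pos hy
    simp only [if_pos hy, hed]
    set t := m - x * i with ht
    by_cases htneg : t < 0
    · simp only [if_pos htneg]
      refine innerA_none c m _ acc ?_
      intro j hj
      have hjb := (hmem j).mp hj
      simp only [hc]
      nlinarith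
    · simp only [if_neg htneg]
      set jstar : Int := min (t / y) m with hjstar
      have hq0 : 0 ≤ t / y := Int.ediv_nonneg (by omega) (by omega)
      have hdm := Int.mul_ediv_add_emod t y
      have hmod1 : 0 ≤ t % y := Int.emod_nonneg t (by omega)
      have hmod2 : t % y < y := Int.emod_lt_of_pos t hy
      refine innerA_best c m _ acc jstar ((hmem _).mpr (by omega)) ?_ ?_
      · -- feasibility: y * jstar ≤ t
        simp only [hc]
        rcases le_or_gt (t / y) m with h0 | h0
        · have : jstar = t / y := by omega
          rw [this]; omega
        · have h1 : jstar = m := by omega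
          have : y * m ≤ y * (t / y) := by
            apply mul_le_mul_of_nonneg_left (by omega) (by omega)
          rw [h1]; omega
      · intro j hj hfeas
        have hjb := (hmem j).mp hj
        simp only [hc] at hfeas ⊢
        have hyj : y * j ≤ t := by omega
        have hle : j ≤ t / y := by
          rw [Int.le_ediv_iff_mul_le hy]; nlinarith
        have : j ≤ jstar := by omega
        nlinarith

-- two folds with pointwise-equal step functions agree
theorem foldl_fun_eq {α β : Type} (f g : α → β → α) (h : ∀ a b, f a b = g a b)
    (l : List β) (init : α) : l.foldl f init = l.foldl g init := by
  induction l generalizing init with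
  | nil => rfl
  | cons b l ih => simp only [List.foldl_cons, h, ih]

-- ===== VERDICT (by name: the statement is the Claim_ definition above) =====
theorem solve_spec : Claim_equal_solve := by
  intro x y m _
  show solve x y m = solve_alt x y m
  unfold solve solve_alt
  rcases le_or_gt 0 m with hm | hm
  · exact foldl_fun_eq _ _ (fun acc i => step_eq x y m i acc hm) _ 0
  · rw [PySem.List.pyRange_one_eq_nil (by omega)]
    rfl
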